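-- pv_equiv track=rewrite | github.com/malris/epam_python_autumn_2020 | homework2/task01/symbols.py | _form_longest_diverse_words_list
-- ===== SOURCE A (Python) =====
-- from collections import defaultdict
-- from typing import Dict, List
--
-- def _form_longest_diverse_words_list(
--     current_longest_diverse_words: List[str], words: List[str], length: int
-- ) -> List[str]:
--     words.extend(current_longest_diverse_words)
--     words_dictionary = _form_words_dictionary(words)
--
--     result = []
--     for key in sorted(words_dictionary, reverse=True):
--         if len(result) < length:
--             result.extend(sorted(words_dictionary[key], key=len, reverse=True))
--         else:
--             break
--
--     return result[:length]
--
-- def _form_words_dictionary(words: List[str]) -> Dict[int, List[str]]: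
--     d = defaultdict(list)
--     for word in words:
--         word_unique_sym_len = len(set(word))
--         if word not in d[word_unique_sym_len]:
--             d[word_unique_sym_len].append(word)
--     return d
-- ===== SOURCE B (Python) =====
-- def _form_longest_diverse_words_list(current_longest_diverse_words, words, length):
--     words.extend(current_longest_diverse_words)
--     seen = set()
--     unique_words = []
--     for word in words:
--         if word not in seen:
--             seen.add(word)
--             unique_words.append(word)
--     unique_words.sort(key=lambda w: (len(set(w)), len(w)), reverse=True)
--     return unique_words[:max(length, 0)]
-- ===== Notes on version B (the rewrite author's own statement) =====
-- stated objective: simpler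
-- what changed: Replaces A's defaultdict grouping by unique-symbol count plus per-group length-sorts concatenated over descending keys (with an early break) by a single seen-set dedup pass followed by ONE stable sort on the tuple key (len(set(w)), len(w)) reverse=True, sliced with a clamped length.
import Mathlib
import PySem

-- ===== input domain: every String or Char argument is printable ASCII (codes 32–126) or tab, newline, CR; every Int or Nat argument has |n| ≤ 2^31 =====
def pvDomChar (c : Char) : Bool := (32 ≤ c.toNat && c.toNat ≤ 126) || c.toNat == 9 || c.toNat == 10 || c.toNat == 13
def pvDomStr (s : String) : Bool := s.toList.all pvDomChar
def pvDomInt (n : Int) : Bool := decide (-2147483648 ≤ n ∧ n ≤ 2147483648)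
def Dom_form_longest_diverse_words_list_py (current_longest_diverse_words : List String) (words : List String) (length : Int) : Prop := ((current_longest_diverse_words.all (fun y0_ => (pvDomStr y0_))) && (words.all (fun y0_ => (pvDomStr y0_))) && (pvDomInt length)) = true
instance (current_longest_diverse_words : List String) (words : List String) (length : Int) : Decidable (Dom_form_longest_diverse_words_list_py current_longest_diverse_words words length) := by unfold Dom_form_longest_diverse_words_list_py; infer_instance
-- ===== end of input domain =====

-- B replaces A's per-unique-count grouping dict and per-group sorts by one dedup pass and one
-- stable two-key sort (objective: simpler).  Both Pythons extend `words` in place exactly alike;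
-- the equivalence proved here is about the return value.

-- ===== PORT A =====
-- len(set(word)) as an Int
def pvUniq (w : String) : Int := PySem.List.len (PySem.Set.ofList w.toList)

-- _form_words_dictionary: defaultdict(list); append word to d[len(set(word))] unless present
def pvFormWordsDict (words : List String) : PySem.Dict Int (List String) :=
  words.foldl (fun d word =>
    let k := pvUniq word
    let g := d.getD k []
    d.insert k (if word ∈ g then g else g ++ [word])) PySem.Dict.empty

-- the 'for key in sorted(d, reverse=True): if len(result) < length: extend else break' loop
def pvLoopA (d : PySem.Dict Int (List String)) (length : Int) : List Int → List String → List String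
  | [], result => result
  | key :: keys, result =>
      if PySem.List.len result < length then
        pvLoopA d length keys
          (result ++ PySem.List.sorted (d.getD key []) (fun w => PySem.Str.len w) true)
      else result

def form_longest_diverse_words_list_py (current_longest_diverse_words : List String) (words : List String) (length : Int) : List String :=
  let ws := words ++ current_longest_diverse_words
  let d := pvFormWordsDict ws
  let result := pvLoopA d length (PySem.List.sorted (PySem.Dict.keys d) (fun k => k) true) []
  PySem.List.slice result none (some length)

-- ===== PORT B =====
def form_longest_diverse_words_list_py_alt (current_longest_diverse_words : List String) (words : List String) (length : Int) : List String :=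
  let ws := words ++ current_longest_diverse_words
  -- seen-set dedup pass: state = (seen, unique_words)
  let uniqueWords := (ws.foldl (fun (st : PySem.Set String × List String) word =>
      if word ∈ st.1 then st else (PySem.Set.add st.1 word, st.2 ++ [word]))
      (PySem.Set.empty, [])).2
  -- unique_words.sort(key=lambda w: (len(set(w)), len(w)), reverse=True)
  let sortedWords := PySem.List.sorted2 uniqueWords pvUniq (fun w => PySem.Str.len w) true
  PySem.List.slice sortedWords none (some (max length 0))

-- ===== PRECONDITION & SPEC =====
def Spec_form_longest_diverse_words_list_py (current_longest_diverse_words : List String) (words : List String) (length : Int) (out : List String) : Prop := out = form_longest_diverse_words_list_py_alt current_longest_diverse_words words length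
instance (current_longest_diverse_words : List String) (words : List String) (length : Int) (out : List String) : Decidable (Spec_form_longest_diverse_words_list_py current_longest_diverse_words words length out) := by unfold Spec_form_longest_diverse_words_list_py; infer_instance

-- ===== CLAIM (what is proved, stated in full; the proofs are below) =====
def Claim_equal_form_longest_diverse_words_list_py : Prop := ∀ (current_longest_diverse_words : List String) (words : List String) (length : Int), Dom_form_longest_diverse_words_list_py current_longest_diverse_words words length → Spec_form_longest_diverse_words_list_py current_longest_diverse_words words length (form_longest_diverse_words_list_py current_longest_diverse_words words length)

-- ===== LEMMAS AND PROOFS =====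

-- generic stability of one insertBy step
theorem pvInsertBy_pairwise {α : Type} (bef : α → α → Bool) (R : α → α → Prop) (idx : α → Nat)
    (hBef : ∀ x y, bef x y = true → R x y)
    (hNotBef : ∀ x y, bef x y = false → idx y < idx x → R y x)
    (hTrans : ∀ x y z, bef x y = true → R y z → R x z)
    (x : α) (acc : List α) (hacc : acc.Pairwise R) (hidx : ∀ y ∈ acc, idx y < idx x) :
    (PySem.List.insertBy bef x acc).Pairwise R := by
  induction acc with
  | nil => simp [PySem.List.insertBy]
  | cons y ys ih =>
    rcases List.pairwise_cons.1 hacc with ⟨hy, hys⟩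
    by_cases h : bef x y = true
    · simp only [PySem.List.insertBy, h, if_true]
      refine List.pairwise_cons.2 ⟨?_, hacc⟩
      intro z hz
      rcases List.mem_cons.1 hz with rfl | hz
      · exact hBef _ _ h
      · exact hTrans x y z h (hy z hz)
    · simp only [PySem.List.insertBy, h]
      refine List.pairwise_cons.2 ⟨?_, ih hys (fun a ha => hidx a (List.mem_cons_of_mem _ ha))⟩
      intro w hw
      rcases (PySem.List.mem_insertBy _ _ _ _).1 hw with rfl | hw
      · exact hNotBef w y (Bool.eq_false_iff.2 h) (hidx y (List.mem_cons_self ..))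
      · exact hy w hw

theorem pvFoldlInsertBy_pairwise {α : Type} (bef : α → α → Bool) (R : α → α → Prop) (idx : α → Nat)
    (hBef : ∀ x y, bef x y = true → R x y)
    (hNotBef : ∀ x y, bef x y = false → idx y < idx x → R y x)
    (hTrans : ∀ x y z, bef x y = true → R y z → R x z) :
    ∀ (rest acc : List α), acc.Pairwise R → (∀ y ∈ acc, ∀ x ∈ rest, idx y < idx x) →
      rest.Pairwise (fun a b => idx a < idx b) →
      (rest.foldl (fun acc x => PySem.List.insertBy bef x acc) acc).Pairwise R := by
  intro rest
  induction rest with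
  | nil => intro acc h _ _; simpa using h
  | cons x rest ih =>
    intro acc hacc hidx hrest
    rcases List.pairwise_cons.1 hrest with ⟨hx, hrest'⟩
    simp only [List.foldl_cons]
    apply ih
    · exact pvInsertBy_pairwise bef R idx hBef hNotBef hTrans x acc hacc
        (fun y hy => hidx y hy x (List.mem_cons_self ..))
    · intro y hy z hz
      rcases (PySem.List.mem_insertBy _ _ _ _).1 hy with rfl | hy
      · exact hx z hz
      · exact hidx y hy z (List.mem_cons_of_mem _ hz)
    · exact hrest'

-- a Nodup list is strictly increasing under its own idxOf
theorem pvPairwise_idxOf {l : List String} (h : l.Nodup) :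
    l.Pairwise (fun a b => l.idxOf a < l.idxOf b) := by
  induction l with
  | nil => exact List.Pairwise.nil
  | cons x t ih =>
    rcases List.nodup_cons.1 h with ⟨hx, ht⟩
    refine List.pairwise_cons.2 ⟨?_, ?_⟩
    · intro b hb
      have hbx : b ≠ x := fun e => hx (e ▸ hb)
      simp [Ne.symm hbx]
    · refine (ih ht).imp_of_mem ?_
      intro a b ha hb hab
      have hax : a ≠ x := fun e => hx (e ▸ ha)
      have hbx : b ≠ x := fun e => hx (e ▸ hb)
      simp [Ne.symm hax, Ne.symm hbx]
      omega

-- sorted(xs, key, reverse=True) is pairwise (key-desc, idx-asc)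
theorem pvSortedRev_pairwise {α : Type} (key : α → Int) (idx : α → Nat) (xs : List α)
    (hxs : xs.Pairwise (fun a b => idx a < idx b)) :
    (PySem.List.sorted xs key true).Pairwise
      (fun a b => key b < key a ∨ (key a = key b ∧ idx a < idx b)) := by
  have e : PySem.List.sorted xs key true =
      xs.foldl (fun acc x => PySem.List.insertBy (fun a b => decide (key b < key a)) x acc) [] := rfl
  rw [e]
  apply pvFoldlInsertBy_pairwise _ _ idx _ _ _ _ _ List.Pairwise.nil (by simp) hxs
  · intro x y h; simp at h; omega
  · intro x y h hlt; simp at h; omega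
  · intro x y z h hyz; simp at h; omega

-- sorted2(xs, k1, k2, reverse=True) is pairwise ((k1,k2)-lex-desc, idx-asc)
theorem pvSorted2Rev_pairwise {α : Type} (k1 k2 : α → Int) (idx : α → Nat) (xs : List α)
    (hxs : xs.Pairwise (fun a b => idx a < idx b)) :
    (PySem.List.sorted2 xs k1 k2 true).Pairwise
      (fun a b => k1 b < k1 a ∨ (k1 a = k1 b ∧ (k2 b < k2 a ∨ (k2 a = k2 b ∧ idx a < idx b)))) := by
  have e : PySem.List.sorted2 xs k1 k2 true =
      xs.foldl (fun acc x => PySem.List.insertBy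
        (fun a b => decide (k1 b < k1 a) || (!decide (k1 a < k1 b) && decide (k2 b < k2 a))) x acc) [] := rfl
  rw [e]
  apply pvFoldlInsertBy_pairwise _ _ idx _ _ _ _ _ List.Pairwise.nil (by simp) hxs
  · intro x y h; simp at h; omega
  · intro x y h hlt; simp at h; omega
  · intro x y z h hyz; simp at h; omega

-- the dict's group at key k is the filter of the deduped word list
theorem pvFormWordsDict_getD_aux :
    ∀ (ws : List String) (d : PySem.Dict Int (List String)) (seen : List String),
      (∀ k, d.getD k [] = seen.filter (fun w => pvUniq w == k)) →
      ∀ k, (ws.foldl (fun d word =>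
              let k := pvUniq word
              let g := d.getD k []
              d.insert k (if word ∈ g then g else g ++ [word])) d).getD k []
        = (PySem.Set.update seen ws).filter (fun w => pvUniq w == k) := by
  intro ws
  induction ws with
  | nil => intro d seen h k; simpa [PySem.Set.update] using h k
  | cons w ws ih =>
    intro d seen h k
    rw [PySem.Set.update_cons]
    simp only [List.foldl_cons]
    by_cases hmem : w ∈ seen
    · have hw : w ∈ d.getD (pvUniq w) [] := by
        rw [h (pvUniq w)]; simp [List.mem_filter, hmem]
      rw [PySem.Set.add_of_mem hmem] at *
      apply ih
      intro k'
      simp only [hw, if_pos]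
      rw [PySem.Dict.getD_insert]
      split_ifs with hk
      · subst hk; exact h _
      · exact h _
    · have hw : w ∉ d.getD (pvUniq w) [] := by
        rw [h (pvUniq w)]; simp [List.mem_filter, hmem]
      rw [PySem.Set.add_of_not_mem hmem]
      apply ih
      intro k'
      simp only [hw, if_false]
      rw [PySem.Dict.getD_insert, List.filter_append]
      split_ifs with hk
      · subst hk; rw [h _]; simp
      · rw [h _]
        have : (pvUniq w == k') = false := by simpa using fun e => hk e.symm
        simp [this]

theorem pvFormWordsDict_getD (ws : List String) (k : Int) :
    (pvFormWordsDict ws).getD k [] = (PySem.Set.ofList ws).filter (fun w => pvUniq w == k) := by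
  have := pvFormWordsDict_getD_aux ws PySem.Dict.empty [] (by intro k; simp) k
  simpa [pvFormWordsDict, PySem.Set.update_nil_left] using this

theorem pvFormWordsDict_keys (ws : List String) :
    (pvFormWordsDict ws).keys = PySem.Set.ofList (ws.map pvUniq) := by
  have e : pvFormWordsDict ws = ws.foldl (fun d word => d.insert (pvUniq word)
      (let g := d.getD (pvUniq word) []; if word ∈ g then g else g ++ [word])) PySem.Dict.empty := rfl
  rw [e, PySem.Dict.keys_foldl_insert_key]
  simp [PySem.Set.update_nil_left, PySem.Dict.keys_empty]

-- pairwise lift to the concatenation over strictly descending keys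
theorem pvFlatMap_pairwise (R : String → String → Prop) (γ : Int → List String) :
    ∀ (K : List Int), K.Pairwise (fun a b => b < a) →
      (∀ k ∈ K, (γ k).Pairwise R) →
      (∀ k ∈ K, ∀ w ∈ γ k, pvUniq w = k) →
      (∀ a b, pvUniq b < pvUniq a → R a b) →
      (K.flatMap γ).Pairwise R := by
  intro K
  induction K with
  | nil => intro _ _ _ _; simp
  | cons k K ih =>
    intro hK hγ hval hlt
    rcases List.pairwise_cons.1 hK with ⟨hk, hK'⟩
    rw [List.flatMap_cons]
    rw [List.pairwise_append]
    refine ⟨hγ k (List.mem_cons_self ..), ih hK' (fun k' h => hγ k' (List.mem_cons_of_mem _ h))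
      (fun k' h => hval k' (List.mem_cons_of_mem _ h)) hlt, ?_⟩
    intro a ha b hb
    rcases List.mem_flatMap.1 hb with ⟨k', hk', hb'⟩
    apply hlt
    rw [hval k (List.mem_cons_self ..) a ha, hval k' (List.mem_cons_of_mem _ hk') b hb']
    exact hk k' hk'

-- the concatenation of the key-filters over a covering Nodup key list is a permutation
theorem pvFlatMapFilter_perm :
    ∀ (K : List Int) (L : List String), K.Nodup → (∀ w ∈ L, pvUniq w ∈ K) →
      (K.flatMap (fun k => L.filter (fun w => pvUniq w == k))).Perm L := by
  intro K
  induction K with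
  | nil =>
    intro L _ hcov
    have : L = [] := by
      cases L with
      | nil => rfl
      | cons a l => exact absurd (hcov a (List.mem_cons_self ..)) (by simp)
    simp [this]
  | cons k K ih =>
    intro L hnd hcov
    rcases List.nodup_cons.1 hnd with ⟨hk, hK⟩
    rw [List.flatMap_cons]
    have hcongr : ∀ k' ∈ K, L.filter (fun w => pvUniq w == k')
        = (L.filter (fun w => !(pvUniq w == k))).filter (fun w => pvUniq w == k') := by
      intro k' hk'
      rw [List.filter_filter]
      apply List.filter_congr
      intro w _
      by_cases h : pvUniq w = k'
      · have : pvUniq w ≠ k := by rintro rfl; exact hk (h ▸ hk')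
        have hkk : k' ≠ k := fun e => this (h.trans e)
        simp [h, hkk]
      · simp [h]
    have e2 : K.flatMap (fun k' => L.filter (fun w => pvUniq w == k'))
        = K.flatMap (fun k' => (L.filter (fun w => !(pvUniq w == k))).filter (fun w => pvUniq w == k')) := by
      apply List.flatMap_congr
      intro k' hk'
      exact hcongr k' hk'
    rw [e2]
    have hperm := ih (L.filter (fun w => !(pvUniq w == k))) hK (by
      intro w hw
      rcases List.mem_filter.1 hw with ⟨hwL, hne⟩
      have := hcov w hwL
      rcases List.mem_cons.1 this with h | h
      · exact absurd h (by simpa using hne)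
      · exact h)
    exact List.Perm.trans (hperm.append_left _) (List.filter_append_perm _ L)

-- B's dedup loop computes set-update on both components
theorem pvBFold :
    ∀ (ws : List String) (S : PySem.Set String),
      ws.foldl (fun (st : PySem.Set String × List String) word =>
          if word ∈ st.1 then st else (PySem.Set.add st.1 word, st.2 ++ [word])) (S, S)
        = (PySem.Set.update S ws, PySem.Set.update S ws) := by
  intro ws
  induction ws with
  | nil => intro S; simp [PySem.Set.update]
  | cons w ws ih =>
    intro S
    rw [PySem.Set.update_cons]
    simp only [List.foldl_cons]
    by_cases h : w ∈ S
    · rw [if_pos h, PySem.Set.add_of_mem h]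
      exact ih S
    · rw [if_neg h]
      have : (PySem.Set.add S w, S ++ [w]) = (PySem.Set.add S w, PySem.Set.add S w) := by
        rw [PySem.Set.add_of_not_mem h]
      rw [this]
      exact ih _

-- the break loop agrees with the full concatenation after truncation
theorem pvLoopA_take (d : PySem.Dict Int (List String)) (len : Int) (n : Nat) (hlen : len = (n : Int)) :
    ∀ (ks : List Int) (res : List String),
      (pvLoopA d len ks res).take n
        = (res ++ ks.flatMap (fun k => PySem.List.sorted (d.getD k []) (fun w => PySem.Str.len w) true)).take n := by
  intro ks
  induction ks with
  | nil => intro res; simp [pvLoopA]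
  | cons k ks ih =>
    intro res
    rw [pvLoopA]
    by_cases h : PySem.List.len res < len
    · rw [if_pos h, List.flatMap_cons, ← List.append_assoc]
      exact ih _
    · rw [if_neg h]
      have hn : n ≤ res.length := by
        simp only [PySem.List.len_eq, hlen] at h
        omega
      rw [List.take_append_of_le_length hn]

theorem pvLoopA_nil_of_neg (d : PySem.Dict Int (List String)) (len : Int) (hlen : len < 0)
    (ks : List Int) : pvLoopA d len ks [] = [] := by
  cases ks with
  | nil => rfl
  | cons k ks =>
    rw [pvLoopA, if_neg]
    simp [PySem.List.len]
    omega

-- the strict order (unique-count desc, length desc, first-occurrence asc) both sides realise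
def pvR (S : List String) (a b : String) : Prop :=
  pvUniq b < pvUniq a ∨ (pvUniq a = pvUniq b ∧
    (PySem.Str.len b < PySem.Str.len a ∨
      (PySem.Str.len a = PySem.Str.len b ∧ S.idxOf a < S.idxOf b)))

theorem pvR_asymm (S : List String) (a b : String) (h1 : pvR S a b) (h2 : pvR S b a) : False := by
  unfold pvR at h1 h2; omega

-- main structural equality: A's concatenation equals B's single two-key sort
theorem pvMainEq (ws : List String) :
    (PySem.List.sorted (PySem.Dict.keys (pvFormWordsDict ws)) (fun k => k) true).flatMap
        (fun k => PySem.List.sorted ((pvFormWordsDict ws).getD k []) (fun w => PySem.Str.len w) true)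
      = PySem.List.sorted2 (PySem.Set.ofList ws) pvUniq (fun w => PySem.Str.len w) true := by
  have hndS : (PySem.Set.ofList ws).Nodup := PySem.Set.nodup_ofList ws
  have hpw := pvPairwise_idxOf hndS
  have hg := pvFormWordsDict_getD ws
  -- the descending key list
  have hKperm := PySem.List.sorted_perm (PySem.Dict.keys (pvFormWordsDict ws)) (fun k => k) true
  have hKnd : (PySem.List.sorted (PySem.Dict.keys (pvFormWordsDict ws)) (fun k => k) true).Nodup := by
    rw [hKperm.nodup_iff, pvFormWordsDict_keys]
    exact PySem.Set.nodup_ofList _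
  have hKdesc : (PySem.List.sorted (PySem.Dict.keys (pvFormWordsDict ws)) (fun k => k) true).Pairwise
      (fun a b => b < a) := by
    have hle := PySem.List.sorted_pairwise_rev (PySem.Dict.keys (pvFormWordsDict ws)) (fun k => k)
    exact (hle.and hKnd).imp (fun h => lt_of_le_of_ne h.1 (Ne.symm h.2))
  -- membership of a sorted group pins the unique count
  have hval : ∀ k, ∀ w ∈ PySem.List.sorted ((pvFormWordsDict ws).getD k [])
      (fun w => PySem.Str.len w) true, pvUniq w = k := by
    intro k w hw
    rw [PySem.List.mem_sorted, hg] at hw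
    rcases List.mem_filter.1 hw with ⟨_, h⟩
    exact eq_of_beq h
  -- LHS is pairwise pvR
  have hLpw : ((PySem.List.sorted (PySem.Dict.keys (pvFormWordsDict ws)) (fun k => k) true).flatMap
      (fun k => PySem.List.sorted ((pvFormWordsDict ws).getD k []) (fun w => PySem.Str.len w) true)).Pairwise
      (pvR (PySem.Set.ofList ws)) := by
    apply pvFlatMap_pairwise _ _ _ hKdesc ?_ (fun k _ => hval k) ?_
    · intro k _
      rw [hg]
      have hpwf : ((PySem.Set.ofList ws).filter (fun w => pvUniq w == k)).Pairwise
          (fun a b => (PySem.Set.ofList ws).idxOf a < (PySem.Set.ofList ws).idxOf b) :=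
        hpw.sublist List.filter_sublist
      have hs := pvSortedRev_pairwise (fun w => PySem.Str.len w) ((PySem.Set.ofList ws).idxOf) _ hpwf
      refine hs.imp_of_mem ?_
      intro a b ha hb hab
      have ha' : pvUniq a = k := by
        rw [PySem.List.mem_sorted] at ha
        exact eq_of_beq (List.mem_filter.1 ha).2
      have hb' : pvUniq b = k := by
        rw [PySem.List.mem_sorted] at hb
        exact eq_of_beq (List.mem_filter.1 hb).2
      exact Or.inr ⟨ha'.trans hb'.symm, hab⟩
    · intro a b h
      exact Or.inl h
  -- LHS is a permutation of the deduped word list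
  have hLperm : ((PySem.List.sorted (PySem.Dict.keys (pvFormWordsDict ws)) (fun k => k) true).flatMap
      (fun k => PySem.List.sorted ((pvFormWordsDict ws).getD k []) (fun w => PySem.Str.len w) true)).Perm
      (PySem.Set.ofList ws) := by
    have h1 : ((PySem.List.sorted (PySem.Dict.keys (pvFormWordsDict ws)) (fun k => k) true).flatMap
        (fun k => PySem.List.sorted ((pvFormWordsDict ws).getD k []) (fun w => PySem.Str.len w) true)).Perm
        ((PySem.List.sorted (PySem.Dict.keys (pvFormWordsDict ws)) (fun k => k) true).flatMap
          (fun k => (PySem.Set.ofList ws).filter (fun w => pvUniq w == k))) := by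
      apply List.Perm.flatMap_left
      intro k _
      rw [hg]
      exact PySem.List.sorted_perm _ _ _
    have hcov : ∀ w ∈ PySem.Set.ofList ws, pvUniq w ∈
        PySem.List.sorted (PySem.Dict.keys (pvFormWordsDict ws)) (fun k => k) true := by
      intro w hw
      rw [PySem.List.mem_sorted, pvFormWordsDict_keys, PySem.Set.mem_ofList, List.mem_map]
      exact ⟨w, (PySem.Set.mem_ofList _ _).1 hw, rfl⟩
    exact h1.trans (pvFlatMapFilter_perm _ _ hKnd hcov)
  -- RHS is pairwise pvR and a permutation of the same list
  have hRpw := pvSorted2Rev_pairwise pvUniq (fun w => PySem.Str.len w)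
    ((PySem.Set.ofList ws).idxOf) (PySem.Set.ofList ws) hpw
  have hRperm := PySem.List.sorted2_perm (PySem.Set.ofList ws) pvUniq (fun w => PySem.Str.len w) true
  exact (hLperm.trans hRperm.symm).eq_of_pairwise
    (fun a b _ _ h1 h2 => (pvR_asymm _ a b h1 h2).elim) hLpw hRpw

-- ===== VERDICT (by name: the statement is the Claim_ definition above) =====
theorem pvSliceNil (b : Int) : PySem.List.slice ([] : List String) none (some b) = [] := by
  simp [PySem.List.slice]

theorem form_longest_diverse_words_list_py_spec : Claim_equal_form_longest_diverse_words_list_py := by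
  intro cur words length _
  unfold Spec_form_longest_diverse_words_list_py
  unfold form_longest_diverse_words_list_py form_longest_diverse_words_list_py_alt
  dsimp only
  have hB : ((words ++ cur).foldl (fun (st : PySem.Set String × List String) word =>
      if word ∈ st.1 then st else (PySem.Set.add st.1 word, st.2 ++ [word]))
      (PySem.Set.empty, [])).2 = PySem.Set.ofList (words ++ cur) := by
    rw [show ((PySem.Set.empty, []) : PySem.Set String × List String)
        = (([] : PySem.Set String), ([] : List String)) from rfl]
    rw [pvBFold (words ++ cur) []]
    exact PySem.Set.update_nil_left _
  rw [hB]
  by_cases hlen : 0 ≤ length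
  · have hcast : length = ((length.toNat : Nat) : Int) := by omega
    rw [max_eq_left hlen, hcast, PySem.List.slice_to_natCast, PySem.List.slice_to_natCast]
    rw [pvLoopA_take (pvFormWordsDict (words ++ cur)) ((length.toNat : Nat) : Int) length.toNat rfl]
    rw [List.nil_append, pvMainEq (words ++ cur)]
  · have hneg : length < 0 := by omega
    rw [pvLoopA_nil_of_neg _ _ hneg, pvSliceNil]
    rw [max_eq_right (le_of_lt hneg)]
    rw [show (0 : Int) = ((0 : Nat) : Int) from rfl, PySem.List.slice_to_natCast]
    simp
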